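-- pv_equiv track=rewrite | github.com/dltmdrl1244/AlgorithmStudy | BOJ/Divide & Conquer/2447_별 찍기/BJ_2447.py | append_star
-- ===== SOURCE A (Python) =====
-- def append_star(n) :
--     if n == 1 :
--         return ['*']
--
--     L = []
--     # 크기가 n/3 by n/3인 사각형을 재귀 호출하여 stars에 저장.
--     # 이 stars의 각 라인을 여러번 곱하고 이어붙이는 식으로 정답 L을 만들어 낼 것
--     stars = append_star(n//3)
--
--     # 첫 번째, 세 번째 부분은 이 전 단계의 사각형 3개를 이어붙인 모양을 띤다.
--     # stars는 n/3 줄, 즉 n/3개의 원소를 가지는 리스트 형태이다.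
--     for star in stars :
--         L.append(star * 3)
--     # 두 번째 부분은 중간에 n/3 by n/3 크기의 공백이 있어야 한다.
--     # 그래서 하나와 하나 사이에 공백을 n/3개씩 만들어서 이어 붙인다.
--     for star in stars :
--         L.append(star + ' ' * (n//3) + star)
--     for star in stars :
--         L.append(star * 3)
--
--     # 총 n/3 * 3 = n번 이어 붙여서 n x n 모양의 리스트 L이 생성되었음
--     return L
-- ===== SOURCE B (Python) =====
-- def append_star(n):
--     # Iterative bottom-up: collect the blank widths of each recursion level
--     # (m // 3 for m = n, n//3, ...), then grow the pattern bottom-up from the base row.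
--     blanks = []
--     m = n
--     while m > 1:
--         m //= 3
--         blanks.append(m)
--     rows = ['*']
--     for b in reversed(blanks):
--         top = [r * 3 for r in rows]
--         mid = [r + ' ' * b + r for r in rows]
--         rows = top + mid + top
--     return rows
-- ===== Notes on version B (the rewrite author's own statement) =====
-- stated objective: alternative
-- what changed: Replaces A's top-down recursion with an iterative bottom-up construction: first collect the per-level blank widths (m//3 for successive thirds of n), then grow the pattern from the single-star base case by folding over those levels; Pre_ excludes exactly the n on which A's recursion never reaches its base case and raises RecursionError.
import Mathlib
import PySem

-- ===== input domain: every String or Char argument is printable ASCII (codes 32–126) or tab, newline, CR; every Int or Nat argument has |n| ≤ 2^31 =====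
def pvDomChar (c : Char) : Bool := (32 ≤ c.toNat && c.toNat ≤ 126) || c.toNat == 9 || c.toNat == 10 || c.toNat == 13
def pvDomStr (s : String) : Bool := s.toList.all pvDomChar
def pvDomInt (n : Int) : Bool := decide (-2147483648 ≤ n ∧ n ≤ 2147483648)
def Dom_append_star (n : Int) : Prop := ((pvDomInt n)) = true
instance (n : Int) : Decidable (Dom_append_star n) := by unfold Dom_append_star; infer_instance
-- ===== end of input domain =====

-- B builds the pattern iteratively (explicit list of per-level blank widths, then a
-- bottom-up fold) instead of A's top-down recursion; objective: alternative decomposition.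

-- ===== PORT A =====
-- rows kept as List Char (Python str per PySem.Chars convention); wrapped to String at the end.
-- termination lemma for the recursion n -> n // 3
theorem pv_floordiv3_lt (n : Int) (h : 1 < n) :
    (PySem.Int.floordiv n 3).toNat < n.toNat := by
  rw [PySem.Int.floordiv_eq_ediv_of_pos (by omega : (0:Int) < 3)]
  omega

def pvStarsA (n : Int) : List (List Char) :=
  if n = 1 then [['*']]
  else if n < 3 then []  -- Python raises RecursionError here (n ≤ 0 or n = 2); excluded by Pre_
  else
    let stars := pvStarsA (PySem.Int.floordiv n 3)
    -- first loop: star * 3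
    (stars.map (fun s => s ++ s ++ s)) ++
    -- second loop: star + ' ' * (n//3) + star
    (stars.map (fun s => s ++ List.replicate (PySem.Int.floordiv n 3).toNat ' ' ++ s)) ++
    -- third loop: star * 3
    (stars.map (fun s => s ++ s ++ s))
termination_by n.toNat
decreasing_by exact pv_floordiv3_lt n (by omega)

def append_star (n : Int) : List String := (pvStarsA n).map String.ofList

-- ===== PORT B =====
-- while m > 1: m //= 3; blanks.append(m)
def pvBlanks (m : Int) : List Int :=
  if 1 < m then
    PySem.Int.floordiv m 3 :: pvBlanks (PySem.Int.floordiv m 3)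
  else []
termination_by m.toNat
decreasing_by exact pv_floordiv3_lt m (by omega)

-- one pass of the for-loop body: rows = top + mid + top
def pvGrow (rows : List (List Char)) (b : Int) : List (List Char) :=
  let top := rows.map (fun r => r ++ r ++ r)
  let mid := rows.map (fun r => r ++ List.replicate b.toNat ' ' ++ r)
  top ++ mid ++ top

def append_star_alt (n : Int) : List String :=
  (((pvBlanks n).reverse).foldl pvGrow [['*']]).map String.ofList

-- ===== PRECONDITION & SPEC =====
-- Pre_ holds exactly when A's recursion reaches its base case (3^k ≤ n < 2*3^k for
-- some k ≥ 0); on every other n Python A raises RecursionError and returns nothing.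
-- The bound k < n.toNat + 1 is no restriction (3^k ≤ n already forces k < n.toNat + 1);
-- it only makes the existential decidable.
def Pre_append_star (n : Int) : Prop :=
  ∃ k ∈ Finset.range (n.toNat + 1), (3:Int)^k ≤ n ∧ n < 2 * 3^k

instance (n : Int) : Decidable (Pre_append_star n) := by
  unfold Pre_append_star; infer_instance

def pvWitness_append_star : Int := (9)

def Spec_append_star (n : Int) (out : List String) : Prop := out = append_star_alt n
instance (n : Int) (out : List String) : Decidable (Spec_append_star n out) := by unfold Spec_append_star; infer_instance

-- ===== CLAIM (what is proved, stated in full; the proofs are below) =====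
def Claim_equal_append_star : Prop := ∀ (n : Int), Dom_append_star n → Pre_append_star n → Spec_append_star n (append_star n)

-- ===== LEMMAS AND PROOFS =====

-- k < 3^k, cast to Int
theorem pv_lt_pow3 (k : Nat) : (k : Int) < 3 ^ k := by
  have := Nat.lt_pow_self (by omega : 1 < 3) (n := k)
  exact_mod_cast this

-- Pre_ is closed under one recursion step (and forces n = 1 or n ≥ 3)
theorem pv_pre_step (n : Int) (hp : Pre_append_star n) (hne : n ≠ 1) :
    3 ≤ n ∧ Pre_append_star (PySem.Int.floordiv n 3) := by
  obtain ⟨k, hk, hlo, hhi⟩ := hp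
  rw [PySem.Int.floordiv_eq_ediv_of_pos (by omega : (0:Int) < 3)]
  match k with
  | 0 => simp at hlo hhi; omega
  | k + 1 =>
    have hp1 : (1:Int) ≤ 3 ^ k := one_le_pow₀ (by omega)
    have h3 : (3:Int) ^ (k+1) = 3 * 3 ^ k := by ring
    have hklt := pv_lt_pow3 k
    refine ⟨by nlinarith, ⟨k, ?_, ?_, ?_⟩⟩
    · simp; omega
    · omega
    · omega

-- unrolling pvBlanks once for n ≥ 3
theorem pv_blanks_step (n : Int) (h : 3 ≤ n) :
    pvBlanks n = PySem.Int.floordiv n 3 :: pvBlanks (PySem.Int.floordiv n 3) := by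
  rw [pvBlanks]; simp [show 1 < n by omega]

-- core equivalence at the List Char level, by strong induction on n.toNat
theorem pv_core (N : Nat) (n : Int) (hN : n.toNat ≤ N) (hp : Pre_append_star n) :
    pvStarsA n = ((pvBlanks n).reverse).foldl pvGrow [['*']] := by
  induction N generalizing n with
  | zero =>
    -- n.toNat = 0 contradicts Pre_ (which forces 1 ≤ n)
    exfalso
    obtain ⟨k, _, hlo, _⟩ := hp
    have : (1:Int) ≤ 3 ^ k := one_le_pow₀ (by omega)
    omega
  | succ N ih =>
    by_cases h1 : n = 1
    · subst h1
      rw [pvStarsA, pvBlanks]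
      simp
    · obtain ⟨h3, hp'⟩ := pv_pre_step n hp h1
      have hd : (PySem.Int.floordiv n 3).toNat ≤ N := by
        have := pv_floordiv3_lt n (by omega)
        omega
      have hIH := ih (PySem.Int.floordiv n 3) hd hp'
      rw [pv_blanks_step n h3]
      rw [pvStarsA]
      simp only [h1, if_false, show ¬ n < 3 by omega, if_false]
      rw [List.reverse_cons, List.foldl_append, ← hIH]
      simp [pvGrow]

-- ===== VERDICT (by name: the statement is the Claim_ definition above) =====
theorem append_star_spec : Claim_equal_append_star := by
  intro n _ hp
  unfold Spec_append_star append_star append_star_alt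
  rw [pv_core n.toNat n le_rfl hp]
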